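-- pv_equiv track=rewrite | github.com/Martori97/TFM-Sentidata | scripts/absa/build_ate_trusted_from_ontology.py | label_tokens_with_aliases
-- ===== SOURCE A (Python) =====
-- from typing import List, Dict
--
-- def label_tokens_with_aliases(tokens: List[str], alias_token_lists: List[List[str]]) -> List[str]:
--     """
--     Marca BIO si cualquier alias (lista de tokens) aparece en 'tokens' (case-insensitive).
--     Si se solapan alias, se prioriza el más largo (greedy).
--     """
--     n = len(tokens)
--     labels = ["O"] * n
--     low = [t.lower() for t in tokens]
--     alias_sorted = sorted(alias_token_lists, key=len, reverse=True)
--     i = 0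
--     while i < n:
--         matched = False
--         for alias in alias_sorted:
--             L = len(alias)
--             if L == 0 or i + L > n:
--                 continue
--             if low[i:i+L] == alias:
--                 labels[i] = "B-ASP"
--                 for k in range(1, L):
--                     labels[i+k] = "I-ASP"
--                 i += L
--                 matched = True
--                 break
--         if not matched:
--             i += 1
--     return labels
-- ===== SOURCE B (Python) =====
-- from typing import List
--
-- def label_tokens_with_aliases(tokens: List[str], alias_token_lists: List[List[str]]) -> List[str]:
--     """
--     BIO-label tokens wherever an alias token-sequence occurs (case-insensitive),
--     greedily preferring the longest match. Hash-set of alias tuples instead of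
--     scanning every alias at every position.
--     """
--     low = [t.lower() for t in tokens]
--     alias_set = {tuple(a) for a in alias_token_lists if a}
--     lengths = sorted({len(a) for a in alias_set}, reverse=True)
--     n = len(low)
--     labels = []
--     i = 0
--     while i < n:
--         for L in lengths:
--             if i + L <= n and tuple(low[i:i+L]) in alias_set:
--                 labels.append("B-ASP")
--                 labels.extend(["I-ASP"] * (L - 1))
--                 i += L
--                 break
--         else:
--             labels.append("O")
--             i += 1
--     return labels
-- ===== Notes on version B (the rewrite author's own statement) =====
-- stated objective: faster
-- what changed: B replaces A's per-position scan over every (length-sorted) alias with a hash-set of alias token-tuples probed once per distinct alias length, and builds the label list by appending runs instead of mutating a preallocated array.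
import Mathlib
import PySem

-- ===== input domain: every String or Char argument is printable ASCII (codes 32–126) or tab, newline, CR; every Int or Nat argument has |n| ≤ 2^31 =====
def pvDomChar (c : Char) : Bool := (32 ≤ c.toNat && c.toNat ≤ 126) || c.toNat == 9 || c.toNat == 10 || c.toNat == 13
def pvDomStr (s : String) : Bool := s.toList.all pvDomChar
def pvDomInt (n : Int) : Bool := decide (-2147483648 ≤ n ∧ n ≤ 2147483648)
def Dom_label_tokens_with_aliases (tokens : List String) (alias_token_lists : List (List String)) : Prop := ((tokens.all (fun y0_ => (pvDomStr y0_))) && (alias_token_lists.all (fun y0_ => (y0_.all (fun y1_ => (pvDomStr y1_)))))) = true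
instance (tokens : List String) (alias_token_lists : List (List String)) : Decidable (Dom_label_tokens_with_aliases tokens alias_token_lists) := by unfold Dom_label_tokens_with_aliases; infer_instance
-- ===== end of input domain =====

-- B replaces A's scan of every alias at every position by a hash-set of alias
-- token-tuples probed once per distinct alias length (objective: faster).

-- ===== PORT A =====
-- the body of A's inner 'for alias in alias_sorted: … break' loop, as find?:
-- continue on (L == 0 or i + L > n), match when low[i:i+L] == alias
def predA (low : List String) (n i : Nat) (a : List String) : Bool :=
  !(a.length == 0) && decide (i + a.length ≤ n) &&
    (PySem.List.slice low (some (i : Int)) (some ((i : Int) + (a.length : Int))) == a)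

-- labels[i] = "B-ASP"; for k in range(1, L): labels[i+k] = "I-ASP"
def writeBIO (labels : List String) (i L : Nat) : List String :=
  (PySem.List.pyRange 1 (L : Int) 1).foldl
    (fun acc k => PySem.List.pySetD acc ((i : Int) + k) "I-ASP")
    (PySem.List.pySetD labels (i : Int) "B-ASP")

-- the while-loop of A: i advances by the matched length (≥ 1) or by 1
def goA (low : List String) (als : List (List String)) (n : Nat) (i : Nat)
    (labels : List String) : List String :=
  if _h : i < n then
    match hf : als.find? (predA low n i) with
    | some a => goA low als n (i + a.length) (writeBIO labels i a.length)
    | none => goA low als n (i + 1) labels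
  else labels
termination_by n - i
decreasing_by
  · have := List.find?_some hf
    simp only [predA, Bool.and_eq_true, beq_iff_eq,
      decide_eq_true_eq, Bool.not_eq_true', beq_eq_false_iff_ne] at this
    omega
  · omega

def label_tokens_with_aliases (tokens : List String) (alias_token_lists : List (List String)) : List String :=
  goA (tokens.map PySem.Str.lower)
    (PySem.List.sorted alias_token_lists (fun a => a.length) true)
    tokens.length 0 (List.replicate tokens.length "O")

-- ===== PORT B =====
-- 'i + L <= n and tuple(low[i:i+L]) in alias_set'
def predB (low : List String) (aset : PySem.Set (List String)) (n i : Nat) (L : Nat) : Bool :=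
  decide (i + L ≤ n) &&
    PySem.Set.contains aset (PySem.List.slice low (some (i : Int)) (some ((i : Int) + (L : Int))))

-- B's while-loop, emitting the label list front to back; hlens (every candidate
-- length is ≥ 1, true of the lengths B builds) only justifies termination
def goB (low : List String) (aset : PySem.Set (List String)) (lens : List Nat)
    (hlens : ∀ L ∈ lens, 1 ≤ L) (n : Nat) (i : Nat) : List String :=
  if _h : i < n then
    match hf : lens.find? (predB low aset n i) with
    | some L => "B-ASP" :: (List.replicate (L - 1) "I-ASP" ++ goB low aset lens hlens n (i + L))
    | none => "O" :: goB low aset lens hlens n (i + 1)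
  else []
termination_by n - i
decreasing_by
  · have hm := List.mem_of_find?_eq_some hf
    have := hlens _ hm
    omega
  · omega

-- lengths = sorted({len(a) for a in alias_set}, reverse=True): all ≥ 1
theorem lensOf_pos (als : List (List String)) :
    ∀ L ∈ PySem.List.sorted
        (PySem.Set.ofList ((PySem.Set.ofList (als.filter (fun a => !a.isEmpty))).map List.length))
        (fun x => x) true, 1 ≤ L := by
  intro L hL
  rw [PySem.List.mem_sorted, PySem.Set.mem_ofList] at hL
  obtain ⟨a, ha, rfl⟩ := List.mem_map.mp hL
  rw [PySem.Set.mem_ofList, List.mem_filter] at ha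
  cases a with
  | nil => simp at ha
  | cons x t => simp

def label_tokens_with_aliases_alt (tokens : List String) (alias_token_lists : List (List String)) : List String :=
  goB (tokens.map PySem.Str.lower)
    (PySem.Set.ofList (alias_token_lists.filter (fun a => !a.isEmpty)))
    (PySem.List.sorted
      (PySem.Set.ofList ((PySem.Set.ofList (alias_token_lists.filter (fun a => !a.isEmpty))).map List.length))
      (fun x => x) true)
    (lensOf_pos alias_token_lists) tokens.length 0

-- ===== PRECONDITION & SPEC =====
def Spec_label_tokens_with_aliases (tokens : List String) (alias_token_lists : List (List String)) (out : List String) : Prop := out = label_tokens_with_aliases_alt tokens alias_token_lists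
instance (tokens : List String) (alias_token_lists : List (List String)) (out : List String) : Decidable (Spec_label_tokens_with_aliases tokens alias_token_lists out) := by unfold Spec_label_tokens_with_aliases; infer_instance

-- ===== CLAIM (what is proved, stated in full; the proofs are below) =====
def Claim_equal_label_tokens_with_aliases : Prop := ∀ (tokens : List String) (alias_token_lists : List (List String)), Dom_label_tokens_with_aliases tokens alias_token_lists → Spec_label_tokens_with_aliases tokens alias_token_lists (label_tokens_with_aliases tokens alias_token_lists)

-- ===== LEMMAS AND PROOFS =====

-- the slice low[i:i+L], proof-side form
def slTk (low : List String) (i L : Nat) : List String := (low.drop i).take L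

-- {tuple(a) for a in alias_token_lists if a}
def asetOf (als : List (List String)) : PySem.Set (List String) :=
  PySem.Set.ofList (als.filter (fun a => !a.isEmpty))

-- sorted({len(a) for a in alias_set}, reverse=True)
def lensOf (als : List (List String)) : List Nat :=
  PySem.List.sorted (PySem.Set.ofList ((asetOf als).map List.length)) (fun x => x) true

theorem predA_iff (low : List String) (n i : Nat) (a : List String) :
    predA low n i a = true ↔
    (a.length ≠ 0 ∧ i + a.length ≤ n ∧ slTk low i a.length = a) := by
  simp [predA, PySem.List.slice_natCast_add, slTk]
  tauto

theorem predB_iff (low : List String) (aset : PySem.Set (List String)) (n i L : Nat) :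
    predB low aset n i L = true ↔ (i + L ≤ n ∧ slTk low i L ∈ aset) := by
  simp [predB, PySem.List.slice_natCast_add, slTk]

theorem length_slTk (low : List String) (n i L : Nat) (hn : low.length = n)
    (h : i + L ≤ n) : (slTk low i L).length = L := by
  simp [slTk]; omega

theorem mem_asetOf (als : List (List String)) (b : List String) :
    b ∈ asetOf als ↔ (b ∈ als ∧ b ≠ []) := by
  simp [asetOf, PySem.Set.mem_ofList, List.mem_filter]

theorem mem_lensOf (als : List (List String)) (L : Nat) :
    L ∈ lensOf als ↔ ∃ b ∈ asetOf als, b.length = L := by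
  simp [lensOf, PySem.List.mem_sorted, PySem.Set.mem_ofList]

theorem lensOf_pos' (als : List (List String)) : ∀ L ∈ lensOf als, 1 ≤ L := by
  intro L hL
  obtain ⟨b, hb, rfl⟩ := (mem_lensOf als L).mp hL
  have := (mem_asetOf als b).mp hb
  cases b with
  | nil => exact absurd rfl this.2
  | cons x t => simp

-- first hit of find? on a list whose keys are nonincreasing has the maximal key
theorem find?_max {α : Type} (key : α → Nat) (p : α → Bool) :
    ∀ (ls : List α) (a : α), ls.Pairwise (fun x y => key y ≤ key x) →
      ls.find? p = some a → ∀ b ∈ ls, p b = true → key b ≤ key a := by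
  intro ls
  induction ls with
  | nil => intro a _ h; simp at h
  | cons x t ih =>
    intro a hpw hf b hb hpb
    rw [List.pairwise_cons] at hpw
    by_cases hx : p x = true
    · rw [List.find?_cons_of_pos hx] at hf
      injection hf with hf; subst hf
      rcases List.mem_cons.mp hb with rfl | hbt
      · exact le_refl _
      · exact hpw.1 b hbt
    · rw [List.find?_cons_of_neg (by simpa using hx)] at hf
      rcases List.mem_cons.mp hb with rfl | hbt
      · exact absurd hpb hx
      · exact ih a hpw.2 hf b hbt hpb

-- transfer: a match of A's scan is a match of B's length probe, and vice versa
theorem matchA_to_B (low : List String) (als : List (List String)) (n i : Nat)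
    (a : List String) (ha : a ∈ als)
    (hp : predA low n i a = true) :
    a.length ∈ lensOf als ∧ predB low (asetOf als) n i a.length = true := by
  obtain ⟨h0, hle, hsl⟩ := (predA_iff low n i a).mp hp
  have hane : a ≠ [] := by cases a <;> simp_all
  have hmem : a ∈ asetOf als := (mem_asetOf als a).mpr ⟨ha, hane⟩
  refine ⟨(mem_lensOf als a.length).mpr ⟨a, hmem, rfl⟩, ?_⟩
  exact (predB_iff low _ n i a.length).mpr ⟨hle, by rw [hsl]; exact hmem⟩

theorem matchB_to_A (low : List String) (als : List (List String)) (n i : Nat)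
    (hn : low.length = n) (L : Nat) (hL : L ∈ lensOf als)
    (hp : predB low (asetOf als) n i L = true) :
    slTk low i L ∈ als ∧ (slTk low i L).length = L ∧
      predA low n i (slTk low i L) = true := by
  obtain ⟨hle, hmem⟩ := (predB_iff low _ n i L).mp hp
  have hsl := (mem_asetOf als _).mp hmem
  have hlen : (slTk low i L).length = L := length_slTk low n i L hn hle
  have h1 : 1 ≤ L := lensOf_pos' als L hL
  refine ⟨hsl.1, hlen, (predA_iff low n i _).mpr ⟨by omega, by rw [hlen]; exact hle, ?_⟩⟩
  rw [hlen]

-- the two inner loops find the same match length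
theorem match_eq (low : List String) (als : List (List String)) (n i : Nat)
    (hn : low.length = n) :
    ((PySem.List.sorted als (fun a => a.length) true).find? (predA low n i)).map List.length
      = (lensOf als).find? (predB low (asetOf als) n i) := by
  have hpwA : (PySem.List.sorted als (fun a => a.length) true).Pairwise
      (fun x y => y.length ≤ x.length) := PySem.List.sorted_pairwise_rev als _
  have hpwB : (lensOf als).Pairwise (fun x y => y ≤ x) :=
    PySem.List.sorted_pairwise_rev _ _
  cases hA : (PySem.List.sorted als (fun a => a.length) true).find? (predA low n i) with
  | none =>
    cases hB : (lensOf als).find? (predB low (asetOf als) n i) with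
    | none => rfl
    | some L =>
      exfalso
      have hpB := List.find?_some hB
      have hLmem := List.mem_of_find?_eq_some hB
      obtain ⟨hmemals, hlen, hpA⟩ := matchB_to_A low als n i hn L hLmem hpB
      have : slTk low i L ∈ PySem.List.sorted als (fun a => a.length) true :=
        (PySem.List.mem_sorted _ _ _ _).mpr hmemals
      exact absurd hpA (by simpa using List.find?_eq_none.mp hA _ this)
  | some a =>
    have hpA := List.find?_some hA
    have hamem : a ∈ als :=
      (PySem.List.mem_sorted _ _ _ _).mp (List.mem_of_find?_eq_some hA)
    obtain ⟨hlmem, hpB⟩ := matchA_to_B low als n i a hamem hpA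
    cases hB : (lensOf als).find? (predB low (asetOf als) n i) with
    | none => exact absurd hpB (by simpa using List.find?_eq_none.mp hB _ hlmem)
    | some L =>
      have hpBL := List.find?_some hB
      have hLmem := List.mem_of_find?_eq_some hB
      have h1 : a.length ≤ L := find?_max _ _ _ L hpwB hB a.length hlmem hpB
      obtain ⟨hmemals, hlen, hpA'⟩ := matchB_to_A low als n i hn L hLmem hpBL
      have h2 : L ≤ a.length := by
        have := find?_max List.length _ _ a hpwA hA (slTk low i L)
          ((PySem.List.mem_sorted _ _ _ _).mpr hmemals) hpA'
        omega
      simp [Nat.le_antisymm h1 h2]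

-- for k in range(j, L): labels[i+k] = "I-ASP", on a buffer that is all "O" past i+j
theorem setRun (i L : Nat) :
    ∀ (m j t : Nat) (u : List String), L - j ≤ m → u.length = i + j → L - j ≤ t →
    (PySem.List.pyRange (j : Int) (L : Int) 1).foldl
        (fun acc k => PySem.List.pySetD acc ((i : Int) + k) "I-ASP")
        (u ++ List.replicate t "O")
      = u ++ List.replicate (L - j) "I-ASP" ++ List.replicate (t - (L - j)) "O" := by
  intro m
  induction m with
  | zero =>
    intro j t u hm hu ht
    have hj : L ≤ j := by omega
    rw [PySem.List.pyRange_one_eq_nil (by exact_mod_cast hj)]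
    simp [Nat.sub_eq_zero_of_le hj]
  | succ m ih =>
    intro j t u hm hu ht
    by_cases hj : j < L
    · rw [PySem.List.pyRange_one_cons (by exact_mod_cast hj)]
      rw [List.foldl_cons]
      have hrep : List.replicate t "O" = "O" :: List.replicate (t - 1) "O" := by
        cases t with
        | zero => omega
        | succ t' => simp [List.replicate_succ]
      have hcast : (i : Int) + (j : Int) = ((i + j : Nat) : Int) := by push_cast; ring
      rw [hrep, hcast, PySem.List.pySetD_natCast]
      have hset : (u ++ "O" :: List.replicate (t - 1) "O").set (i + j) "I-ASP"
          = (u ++ ["I-ASP"]) ++ List.replicate (t - 1) "O" := by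
        rw [← hu, List.set_append_right _ _ (le_refl _)]
        simp
      rw [hset]
      have hcast2 : (j : Int) + 1 = ((j + 1 : Nat) : Int) := by push_cast; ring
      rw [hcast2, ih (j + 1) (t - 1) (u ++ ["I-ASP"]) (by omega) (by simp [hu]; omega) (by omega)]
      have h1 : L - j = (L - (j + 1)) + 1 := by omega
      have h2 : t - 1 - (L - (j + 1)) = t - (L - j) := by omega
      rw [h2, h1]
      simp [List.replicate_succ, List.append_assoc]
    · have hj' : L ≤ j := by omega
      rw [PySem.List.pyRange_one_eq_nil (by exact_mod_cast hj')]
      simp [Nat.sub_eq_zero_of_le hj']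

-- writeBIO on "pre ++ all-O" writes B-ASP then L-1 I-ASPs
theorem writeBIO_spec (pre : List String) (i L m : Nat) (hpre : pre.length = i)
    (hL : 1 ≤ L) (hLm : L ≤ m) :
    writeBIO (pre ++ List.replicate m "O") i L
      = pre ++ "B-ASP" :: (List.replicate (L - 1) "I-ASP" ++ List.replicate (m - L) "O") := by
  unfold writeBIO
  have hrep : List.replicate m "O" = "O" :: List.replicate (m - 1) "O" := by
    cases m with
    | zero => omega
    | succ m' => simp [List.replicate_succ]
  rw [hrep, PySem.List.pySetD_natCast]
  have hset : (pre ++ "O" :: List.replicate (m - 1) "O").set i "B-ASP"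
      = (pre ++ ["B-ASP"]) ++ List.replicate (m - 1) "O" := by
    rw [← hpre, List.set_append_right _ _ (le_refl _)]
    simp
  rw [hset]
  have hrun := setRun i L (L - 1) 1 (m - 1) (pre ++ ["B-ASP"]) (by omega) (by simp [hpre]) (by omega)
  simp only [Nat.cast_one] at hrun
  rw [hrun]
  have h1 : m - 1 - (L - 1) = m - L := by omega
  simp [h1, List.append_assoc]

-- main loop invariant: A's in-place writes on "pre ++ all-O" = pre ++ B's emitted tail
theorem goA_eq_goB (low : List String) (als : List (List String)) (n : Nat)
    (hn : low.length = n) :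
    ∀ (m i : Nat) (pre : List String), n - i ≤ m → pre.length = i →
    goA low (PySem.List.sorted als (fun a => a.length) true) n i
        (pre ++ List.replicate (n - i) "O")
      = pre ++ goB low (asetOf als) (lensOf als) (lensOf_pos' als) n i := by
  intro m
  induction m with
  | zero =>
    intro i pre hm hpre
    have hni : ¬ i < n := by omega
    rw [goA, goB]
    simp [hni, Nat.sub_eq_zero_of_le (by omega : n ≤ i)]
  | succ m ih =>
    intro i pre hm hpre
    by_cases hin : i < n
    · have hmeq := match_eq low als n i hn
      rw [goA, goB, dif_pos hin, dif_pos hin]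
      split
      next a hA =>
        rw [hA] at hmeq
        split
        next L hB =>
          rw [hB] at hmeq
          have hLa : L = a.length := by injection hmeq.symm
          subst hLa
          obtain ⟨h0, hle, _⟩ := (predA_iff low n i a).mp (List.find?_some hA)
          rw [writeBIO_spec pre i a.length (n - i) hpre (by omega) (by omega)]
          have hrw : pre ++ "B-ASP" :: (List.replicate (a.length - 1) "I-ASP"
                ++ List.replicate (n - i - a.length) "O")
              = (pre ++ "B-ASP" :: List.replicate (a.length - 1) "I-ASP")
                ++ List.replicate (n - (i + a.length)) "O" := by
            have : n - i - a.length = n - (i + a.length) := by omega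
            simp [this, List.append_assoc]
          rw [hrw]
          have := ih (i + a.length) (pre ++ "B-ASP" :: List.replicate (a.length - 1) "I-ASP")
            (by omega) (by simp [hpre]; omega)
          simpa [List.append_assoc] using this
        next hB => rw [hB] at hmeq; exact absurd hmeq (by simp)
      next hA =>
        rw [hA] at hmeq
        split
        next L hB => rw [hB] at hmeq; exact absurd hmeq (by simp)
        next hB =>
          have hrep : List.replicate (n - i) "O" = "O" :: List.replicate (n - (i + 1)) "O" := by
            have : n - i = (n - (i + 1)) + 1 := by omega
            rw [this]; simp [List.replicate_succ]
          rw [hrep]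
          have := ih (i + 1) (pre ++ ["O"]) (by omega) (by simp [hpre])
          simpa [List.append_assoc] using this
    · rw [goA, goB]
      simp [hin, Nat.sub_eq_zero_of_le (by omega : n ≤ i)]

-- ===== VERDICT (by name: the statement is the Claim_ definition above) =====
theorem label_tokens_with_aliases_spec : Claim_equal_label_tokens_with_aliases := by
  intro tokens als _
  unfold Spec_label_tokens_with_aliases label_tokens_with_aliases label_tokens_with_aliases_alt
  have hn : (tokens.map PySem.Str.lower).length = tokens.length := by simp
  have := goA_eq_goB (tokens.map PySem.Str.lower) als tokens.length hn
    tokens.length 0 [] (by omega) rfl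
  simpa [asetOf, lensOf] using this
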